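-- pv_equiv track=rewrite | github.com/Ritam-Vaskar/bank-agent-nbfc | backend/routes/telegram.py | _assistant_reply_from_messages
-- ===== SOURCE A (Python) =====
-- from typing import Any, Dict, Optional
--
-- def _safe_text(value: Any) -> str:
--     if value is None:
--         return ""
--     return str(value).strip()
--
-- def _assistant_reply_from_messages(messages: list[Dict[str, Any]]) -> str:
--     if not messages:
--         return "I couldn't generate a response. Please try again."
--
--     collected: list[str] = []
--     for entry in reversed(messages):
--         role = _safe_text(entry.get("role")).lower()
--         if role == "user":
--             break
--         if role == "assistant":
--             content = _safe_text(entry.get("content"))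
--             if content:
--                 collected.append(content)
--
--     if not collected:
--         last = messages[-1]
--         fallback = _safe_text(last.get("content"))
--         return fallback or "I couldn't generate a response. Please try again."
--
--     collected.reverse()
--     return "\n\n".join(collected)
-- ===== SOURCE B (Python) =====
-- from typing import Any, Dict
--
-- def _safe_text(value: Any) -> str:
--     if value is None:
--         return ""
--     return str(value).strip()
--
-- def _assistant_reply_from_messages(messages: list) -> str:
--     default = "I couldn't generate a response. Please try again."
--     if not messages:
--         return default
--     split = 0
--     for i, entry in enumerate(messages):
--         if _safe_text(entry.get("role")).lower() == "user":
--             split = i + 1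
--     collected: list[str] = []
--     for entry in messages[split:]:
--         content = _safe_text(entry.get("content"))
--         if _safe_text(entry.get("role")).lower() == "assistant" and content:
--             collected.append(content)
--     if collected:
--         return "\n\n".join(collected)
--     return _safe_text(messages[-1].get("content")) or default
-- ===== Notes on version B (the rewrite author's own statement) =====
-- stated objective: simpler
-- what changed: Replaces A's reversed scan with break and final list reversal by computing the last-user split index, then filtering assistant contents from the suffix in forward order.
import Mathlib
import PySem

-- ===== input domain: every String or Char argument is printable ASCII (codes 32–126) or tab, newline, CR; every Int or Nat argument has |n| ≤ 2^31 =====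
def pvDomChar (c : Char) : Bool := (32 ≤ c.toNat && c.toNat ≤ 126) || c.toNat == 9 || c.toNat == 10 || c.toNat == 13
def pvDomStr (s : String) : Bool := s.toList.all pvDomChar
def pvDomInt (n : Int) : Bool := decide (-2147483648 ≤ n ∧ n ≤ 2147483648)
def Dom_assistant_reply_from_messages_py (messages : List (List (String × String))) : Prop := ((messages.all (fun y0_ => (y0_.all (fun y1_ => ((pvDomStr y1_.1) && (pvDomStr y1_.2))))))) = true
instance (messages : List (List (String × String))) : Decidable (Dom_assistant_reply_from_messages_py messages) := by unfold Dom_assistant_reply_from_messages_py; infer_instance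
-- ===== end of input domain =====

-- B computes the last-user split point and filters forward instead of A's reversed scan with break; objective: simpler decomposition.

-- shared module helpers: entry.get(k) (first match in the association list) and _safe_text
def pvGet (entry : List (String × String)) (k : String) : Option String :=
  (entry.find? (fun p => p.1 == k)).map (·.2)

def pvSafeText (v : Option String) : String :=
  match v with
  | none => ""
  | some s => PySem.Str.strip s

-- ===== PORT A =====
-- the 'for entry in reversed(messages)' loop with break: recursion over the reversed list
def pvCollectRevA : List (List (String × String)) → List String
  | [] => []
  | e :: rest =>
    let role := PySem.Str.lower (pvSafeText (pvGet e "role"))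
    if role = "user" then []
    else if role = "assistant" then
      let content := pvSafeText (pvGet e "content")
      if content ≠ "" then content :: pvCollectRevA rest else pvCollectRevA rest
    else pvCollectRevA rest

def assistant_reply_from_messages_py (messages : List (List (String × String))) : String :=
  if messages = [] then "I couldn't generate a response. Please try again."
  else
    let collected := pvCollectRevA messages.reverse
    if collected = [] then
      let fallback := pvSafeText ((PySem.List.pyGet? messages (-1)).bind (fun last => pvGet last "content"))
      if fallback = "" then "I couldn't generate a response. Please try again." else fallback
    else
      PySem.Str.join "\n\n" collected.reverse

-- ===== PORT B =====
def assistant_reply_from_messages_py_alt (messages : List (List (String × String))) : String :=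
  if messages = [] then "I couldn't generate a response. Please try again."
  else
    let split : Int := (PySem.List.enumerate messages).foldl
      (fun s p => if PySem.Str.lower (pvSafeText (pvGet p.2 "role")) = "user" then p.1 + 1 else s) 0
    let collected := (PySem.List.slice messages (some split) none).foldl
      (fun acc e =>
        if (PySem.Str.lower (pvSafeText (pvGet e "role")) = "assistant"
            ∧ pvSafeText (pvGet e "content") ≠ "") then
          acc ++ [pvSafeText (pvGet e "content")]
        else acc) []
    if collected ≠ [] then PySem.Str.join "\n\n" collected
    else
      let fallback := pvSafeText ((PySem.List.pyGet? messages (-1)).bind (fun last => pvGet last "content"))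
      if fallback = "" then "I couldn't generate a response. Please try again." else fallback

-- ===== PRECONDITION & SPEC =====
def Spec_assistant_reply_from_messages_py (messages : List (List (String × String))) (out : String) : Prop := out = assistant_reply_from_messages_py_alt messages
instance (messages : List (List (String × String))) (out : String) : Decidable (Spec_assistant_reply_from_messages_py messages out) := by unfold Spec_assistant_reply_from_messages_py; infer_instance

-- ===== CLAIM (what is proved, stated in full; the proofs are below) =====
def Claim_equal_assistant_reply_from_messages_py : Prop := ∀ (messages : List (List (String × String))), Dom_assistant_reply_from_messages_py messages → Spec_assistant_reply_from_messages_py messages (assistant_reply_from_messages_py messages)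

-- ===== LEMMAS AND PROOFS =====

def pvRole (e : List (String × String)) : String := PySem.Str.lower (pvSafeText (pvGet e "role"))
def pvContent (e : List (String × String)) : String := pvSafeText (pvGet e "content")

def pvIsA (e : List (String × String)) : Bool :=
  decide (pvRole e = "assistant" ∧ pvContent e ≠ "")

def pvSplit (L : List (List (String × String))) : Int :=
  (PySem.List.enumerate L).foldl (fun s p => if pvRole p.2 = "user" then p.1 + 1 else s) 0

lemma pvCollectRevA_cons (e : List (String × String)) (t : List (List (String × String))) :
    pvCollectRevA (e :: t) =
      if pvRole e = "user" then []
      else (if pvIsA e then [pvContent e] else []) ++ pvCollectRevA t := by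
  simp only [pvCollectRevA, pvRole, pvIsA, pvContent]
  split_ifs with h1 h2 h3 h4 h5 <;> simp_all

lemma pvSplit_append (L : List (List (String × String))) (e : List (String × String)) :
    pvSplit (L ++ [e]) = if pvRole e = "user" then (L.length : Int) + 1 else pvSplit L := by
  simp [pvSplit, PySem.List.enumerate_append, PySem.List.enumerate, pvRole]

lemma pvSplit_bounds (L : List (List (String × String))) :
    0 ≤ pvSplit L ∧ pvSplit L ≤ L.length := by
  induction L using List.reverseRecOn with
  | nil => simp [pvSplit, PySem.List.enumerate]
  | append_singleton L e ih =>
    rw [pvSplit_append]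
    split_ifs <;> simp <;> omega

lemma pvMain (L : List (List (String × String))) :
    pvCollectRevA L.reverse =
      (((L.drop (pvSplit L).toNat).filter pvIsA).map pvContent).reverse := by
  induction L using List.reverseRecOn with
  | nil => simp [pvCollectRevA, pvSplit, PySem.List.enumerate]
  | append_singleton L e ih =>
    rw [List.reverse_append, pvSplit_append]
    simp only [List.reverse_singleton, List.singleton_append, pvCollectRevA_cons, ih]
    by_cases hu : pvRole e = "user"
    · have hlen : ((L.length : Int) + 1).toNat = (L ++ [e]).length := by
        simp
      simp [hu, hlen]
    · obtain ⟨h0, h1⟩ := pvSplit_bounds L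
      have hle : (pvSplit L).toNat ≤ L.length := by omega
      rw [if_neg hu, if_neg hu, List.drop_append_of_le_length hle]
      by_cases ha : pvIsA e <;> simp [ha, List.filter_append]

-- ===== VERDICT (by name: the statement is the Claim_ definition above) =====
theorem assistant_reply_from_messages_py_spec : Claim_equal_assistant_reply_from_messages_py := by
  intro messages _
  unfold Spec_assistant_reply_from_messages_py
  unfold assistant_reply_from_messages_py assistant_reply_from_messages_py_alt
  by_cases hnil : messages = []
  · simp [hnil]
  · rw [if_neg hnil, if_neg hnil]
    have h0 : 0 ≤ pvSplit messages := (pvSplit_bounds messages).1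
    have hslice := PySem.List.slice_from messages h0
    simp only [show (PySem.List.enumerate messages).foldl
        (fun s p => if PySem.Str.lower (pvSafeText (pvGet p.2 "role")) = "user" then p.1 + 1 else s) 0
        = pvSplit messages from rfl]
    rw [hslice]
    rw [show (fun (acc : List String) (e : List (String × String)) =>
        if (PySem.Str.lower (pvSafeText (pvGet e "role")) = "assistant"
            ∧ pvSafeText (pvGet e "content") ≠ "") then acc ++ [pvSafeText (pvGet e "content")]
        else acc)
      = (fun acc e => if pvIsA e then acc ++ [pvContent e] else acc) from ?_]
    · rw [PySem.List.foldl_append_if pvIsA pvContent]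
      rw [pvMain messages]
      simp only [List.nil_append, List.reverse_reverse]
      by_cases hc : ((messages.drop (pvSplit messages).toNat).filter pvIsA).map pvContent = [] <;>
        simp [hc]
    · funext acc e
      simp only [pvIsA, pvContent, pvRole]
      split_ifs with h1 h2 h3 <;> simp_all
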